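-- pv_equiv track=rewrite | github.com/cdklabs/cdk-appmod-catalog-blueprints | use-cases/document-processing/resources/pdf-chunking/chunking_strategies.py | calculate_chunks_token_based
-- ===== SOURCE A (Python) =====
-- from typing import List, Dict, Any, Optional
--
-- def calculate_chunks_token_based(
--     tokens_per_page: List[int],
--     max_tokens_per_chunk: int,
--     overlap_tokens: int = 0
-- ) -> List[Dict[str, Any]]:
--     """
--     Create chunks based on token count instead of fixed pages.
--
--     This strategy ensures no chunk exceeds the token limit by analyzing
--     token density per page. It's ideal for documents with variable content
--     density (e.g., mix of text-heavy and image-heavy pages).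
--
--     Args:
--         tokens_per_page: List of token counts for each page
--         max_tokens_per_chunk: Maximum tokens allowed per chunk
--         overlap_tokens: Target number of overlapping tokens between chunks
--
--     Returns:
--         List of chunk metadata dictionaries with:
--         - chunk_index: Index of the chunk (0-based)
--         - start_page: Starting page number (0-based)
--         - end_page: Ending page number (0-based, inclusive)
--         - page_count: Number of pages in the chunk
--         - token_count: Estimated tokens in the chunk
--
--     Example:
--         >>> tokens = [1500] * 100  # 100 pages, 1500 tokens each
--         >>> chunks = calculate_chunks_token_based(tokens, 100000, 5000)
--         >>> all(c['token_count'] <= 100000 for c in chunks)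
--         True
--     """
--     chunks = []
--     current_chunk_start = 0
--     current_chunk_tokens = 0
--     chunk_index = 0
--
--     for page_num, page_tokens in enumerate(tokens_per_page):
--         # Check if adding this page would exceed the limit
--         if current_chunk_tokens + page_tokens > max_tokens_per_chunk and current_chunk_tokens > 0:
--             # Finalize current chunk
--             chunks.append({
--                 'chunk_index': chunk_index,
--                 'start_page': current_chunk_start,
--                 'end_page': page_num - 1,
--                 'page_count': page_num - current_chunk_start,
--                 'token_count': current_chunk_tokens
--             })
--
--             # Calculate overlap: go back to find pages that sum to overlap_tokens
--             overlap_start_page = page_num - 1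
--             overlap_accumulated = 0
--
--             while (overlap_start_page >= current_chunk_start and
--                    overlap_accumulated < overlap_tokens):
--                 overlap_accumulated += tokens_per_page[overlap_start_page]
--                 overlap_start_page -= 1
--
--             # Start new chunk with overlap
--             current_chunk_start = max(0, overlap_start_page + 1)
--             current_chunk_tokens = overlap_accumulated + page_tokens
--             chunk_index += 1
--         else:
--             # Add page to current chunk
--             current_chunk_tokens += page_tokens
--
--     # Add final chunk
--     if current_chunk_tokens > 0:
--         chunks.append({
--             'chunk_index': chunk_index,
--             'start_page': current_chunk_start,
--             'end_page': len(tokens_per_page) - 1,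
--             'page_count': len(tokens_per_page) - current_chunk_start,
--             'token_count': current_chunk_tokens
--         })
--
--     return chunks
-- ===== SOURCE B (Python) =====
-- from typing import List, Dict, Any
--
-- def calculate_chunks_token_based(
--     tokens_per_page: List[int],
--     max_tokens_per_chunk: int,
--     overlap_tokens: int = 0
-- ) -> List[Dict[str, Any]]:
--     """Chunk-at-a-time reformulation over a prefix-sum array: each iteration of the
--     outer loop emits one whole chunk, locating its break page and its overlap start
--     with prefix-sum comparisons instead of running accumulators."""
--     n = len(tokens_per_page)
--     prefix = [0]
--     for t in tokens_per_page:
--         prefix.append(prefix[-1] + t)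
--
--     def next_break(s: int, p: int) -> int:
--         # first page q >= p whose addition would overflow a non-empty chunk starting at s
--         for q in range(p, n):
--             if prefix[q + 1] - prefix[s] > max_tokens_per_chunk and prefix[q] - prefix[s] > 0:
--                 return q
--         return n
--
--     def overlap_start(s: int, p: int) -> int:
--         # largest m in (s, p] whose suffix s..p-1 carries >= overlap_tokens; else s
--         for m in range(p, s, -1):
--             if prefix[p] - prefix[m] >= overlap_tokens:
--                 return m
--         return s
--
--     def make(idx: int, s: int, e: int) -> Dict[str, Any]:
--         return {
--             'chunk_index': idx,
--             'start_page': s,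
--             'end_page': e - 1,
--             'page_count': e - s,
--             'token_count': prefix[e] - prefix[s],
--         }
--
--     chunks = []
--     s, p = 0, 0
--     while True:
--         q = next_break(s, p)
--         if q == n:
--             if prefix[n] - prefix[s] > 0:
--                 chunks.append(make(len(chunks), s, n))
--             return chunks
--         chunks.append(make(len(chunks), s, q))
--         s = overlap_start(s, q)
--         p = q + 1
-- ===== Notes on version B (the rewrite author's own statement) =====
-- stated objective: alternative
-- what changed: B replaces A's single forward page loop with mutable running accumulators by a chunk-at-a-time outer loop over a precomputed prefix-sum array: helper next_break finds each chunk's break page and overlap_start finds the carried-over start by comparing prefix sums, so no running token accumulators or backward token re-summation are kept.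
import Mathlib
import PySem

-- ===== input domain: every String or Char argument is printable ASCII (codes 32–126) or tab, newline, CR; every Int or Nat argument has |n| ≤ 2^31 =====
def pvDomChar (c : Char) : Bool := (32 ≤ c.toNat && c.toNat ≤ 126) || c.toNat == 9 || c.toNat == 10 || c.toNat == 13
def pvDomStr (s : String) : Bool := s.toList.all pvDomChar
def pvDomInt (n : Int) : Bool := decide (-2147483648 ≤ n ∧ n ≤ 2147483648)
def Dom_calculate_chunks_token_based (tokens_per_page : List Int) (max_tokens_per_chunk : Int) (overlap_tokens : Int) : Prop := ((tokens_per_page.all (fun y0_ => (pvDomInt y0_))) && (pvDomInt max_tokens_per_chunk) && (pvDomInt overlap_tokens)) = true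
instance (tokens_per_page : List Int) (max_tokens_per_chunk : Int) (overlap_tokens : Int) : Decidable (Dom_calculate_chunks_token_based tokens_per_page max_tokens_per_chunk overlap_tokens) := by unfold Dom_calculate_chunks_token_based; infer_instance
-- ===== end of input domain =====

-- ===== PORT A =====
-- One honest line: B restructures A's forward accumulator loop as a chunk-at-a-time loop over prefix sums (objective: alternative).
def pvMkChunk (idx s e pc tc : Int) : List (String × Int) :=
  [("chunk_index", idx), ("start_page", s), ("end_page", e), ("page_count", pc), ("token_count", tc)]

-- A's inner while loop, with a fuel guard that only makes it total (fuel = list length always suffices);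
-- the index ptr is always in [s, p) ⊆ range, so pyGet? is always some (getD 0 exact)
def pvAOverlap (tokens : List Int) (s ov : Int) : Nat → Int → Int → Int × Int
  | 0, ptr, acc => (ptr, acc)
  | fuel + 1, ptr, acc =>
    if s ≤ ptr ∧ acc < ov then
      pvAOverlap tokens s ov fuel (ptr - 1) (acc + ((PySem.List.pyGet? tokens ptr).getD 0))
    else (ptr, acc)

-- A's for loop over enumerate(tokens_per_page): rest is the remaining suffix, p the current page number
def pvALoop (tokens : List Int) (mx ov : Int) :
    List Int → Int → List (List (String × Int)) → Int → Int → Int →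
    List (List (String × Int)) × Int × Int × Int
  | [], _, chunks, s, cur, idx => (chunks, s, cur, idx)
  | t :: rest, p, chunks, s, cur, idx =>
    if cur + t > mx ∧ cur > 0 then
      let r := pvAOverlap tokens s ov tokens.length (p - 1) 0
      pvALoop tokens mx ov rest (p + 1)
        (chunks ++ [pvMkChunk idx s (p - 1) (p - s) cur])
        (max 0 (r.1 + 1)) (r.2 + t) (idx + 1)
    else
      pvALoop tokens mx ov rest (p + 1) chunks s (cur + t) idx

def calculate_chunks_token_based (tokens_per_page : List Int) (max_tokens_per_chunk : Int) (overlap_tokens : Int) : List (List (String × Int)) :=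
  match pvALoop tokens_per_page max_tokens_per_chunk overlap_tokens tokens_per_page 0 [] 0 0 0 with
  | (chunks, s, cur, idx) =>
    if cur > 0 then
      chunks ++ [pvMkChunk idx s ((tokens_per_page.length : Int) - 1) ((tokens_per_page.length : Int) - s) cur]
    else chunks

-- ===== PORT B =====
-- prefix = [0]; for t in tokens: prefix.append(prefix[-1] + t)
def pvBuildPrefix : List Int → Int → List Int
  | [], acc => [acc]
  | t :: r, acc => acc :: pvBuildPrefix r (acc + t)

-- prefix[i]; every index Source B uses is in [0, n], so getD is exact
def pvPref (pre : List Int) (i : Int) : Int := pre.getD i.toNat 0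

-- Source B next_break's for q in range(p, n): the fuel is the length (n - p) of the range; n if no page triggers
def pvNextBreak (pre : List Int) (mx n s : Int) : Nat → Int → Int
  | 0, _p => n
  | fuel + 1, p =>
    if pvPref pre (p + 1) - pvPref pre s > mx ∧ pvPref pre p - pvPref pre s > 0 then p
    else pvNextBreak pre mx n s fuel (p + 1)

-- Source B overlap_start's for m in range(p, s, -1): the fuel is the length (p - s) of the range; s if no m qualifies
def pvOverlapStart (pre : List Int) (ov s p : Int) : Nat → Int → Int
  | 0, _m => s
  | fuel + 1, m =>
    if pvPref pre p - pvPref pre m ≥ ov then m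
    else pvOverlapStart pre ov s p fuel (m - 1)

def pvBMake (pre : List Int) (idx s e : Int) : List (String × Int) :=
  [("chunk_index", idx), ("start_page", s), ("end_page", e - 1), ("page_count", e - s),
   ("token_count", pvPref pre e - pvPref pre s)]

-- Source B's outer while True loop: one iteration per emitted chunk; the fuel guard (length + 1 always
-- suffices, as the restart page q + 1 strictly increases) only makes it total
def pvBLoop (pre : List Int) (mx ov n : Int) :
    Nat → List (List (String × Int)) → Int → Int → List (List (String × Int))
  | 0, chunks, _s, _p => chunks
  | fuel + 1, chunks, s, p =>
    if pvNextBreak pre mx n s ((n - p).toNat) p = n then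
      if pvPref pre n - pvPref pre s > 0 then chunks ++ [pvBMake pre (chunks.length : Int) s n]
      else chunks
    else
      pvBLoop pre mx ov n fuel
        (chunks ++ [pvBMake pre (chunks.length : Int) s (pvNextBreak pre mx n s ((n - p).toNat) p)])
        (pvOverlapStart pre ov s (pvNextBreak pre mx n s ((n - p).toNat) p)
          ((pvNextBreak pre mx n s ((n - p).toNat) p - s).toNat)
          (pvNextBreak pre mx n s ((n - p).toNat) p))
        (pvNextBreak pre mx n s ((n - p).toNat) p + 1)

def calculate_chunks_token_based_alt (tokens_per_page : List Int) (max_tokens_per_chunk : Int) (overlap_tokens : Int) : List (List (String × Int)) :=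
  pvBLoop (pvBuildPrefix tokens_per_page 0) max_tokens_per_chunk overlap_tokens
    (tokens_per_page.length : Int) (tokens_per_page.length + 1) [] 0 0

-- ===== PRECONDITION & SPEC =====
def Spec_calculate_chunks_token_based (tokens_per_page : List Int) (max_tokens_per_chunk : Int) (overlap_tokens : Int) (out : List (List (String × Int))) : Prop := out = calculate_chunks_token_based_alt tokens_per_page max_tokens_per_chunk overlap_tokens
instance (tokens_per_page : List Int) (max_tokens_per_chunk : Int) (overlap_tokens : Int) (out : List (List (String × Int))) : Decidable (Spec_calculate_chunks_token_based tokens_per_page max_tokens_per_chunk overlap_tokens out) := by unfold Spec_calculate_chunks_token_based; infer_instance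

-- ===== CLAIM (what is proved, stated in full; the proofs are below) =====
def Claim_equal_calculate_chunks_token_based : Prop := ∀ (tokens_per_page : List Int) (max_tokens_per_chunk : Int) (overlap_tokens : Int), Dom_calculate_chunks_token_based tokens_per_page max_tokens_per_chunk overlap_tokens → Spec_calculate_chunks_token_based tokens_per_page max_tokens_per_chunk overlap_tokens (calculate_chunks_token_based tokens_per_page max_tokens_per_chunk overlap_tokens)

-- ===== LEMMAS AND PROOFS =====

-- sum of the first i token counts: the common value of A's accumulators and B's prefix cells
def pvSum (tokens : List Int) (i : Int) : Int := (tokens.take i.toNat).sum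

lemma pvBuildPrefix_getD (ts : List Int) (a : Int) (k : Nat) (hk : k ≤ ts.length) :
    (pvBuildPrefix ts a).getD k 0 = a + (ts.take k).sum := by
  induction ts generalizing a k with
  | nil =>
    have hk0 : k = 0 := by simpa using hk
    subst hk0
    simp [pvBuildPrefix]
  | cons t r ih =>
    cases k with
    | zero => simp [pvBuildPrefix]
    | succ k =>
      simp only [pvBuildPrefix, List.getD_cons_succ, List.take_succ_cons, List.sum_cons]
      rw [ih (a + t) k (by simpa using hk)]
      ring

lemma pvPref_eq (tokens : List Int) (i : Int) (h0 : 0 ≤ i) (hn : i ≤ (tokens.length : Int)) :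
    pvPref (pvBuildPrefix tokens 0) i = pvSum tokens i := by
  unfold pvPref pvSum
  rw [pvBuildPrefix_getD tokens 0 i.toNat (by omega)]
  ring

lemma pvSum_succ (tokens : List Int) (p : Int) (h0 : 0 ≤ p) (hl : p < (tokens.length : Int)) :
    pvSum tokens (p + 1) = pvSum tokens p + (PySem.List.pyGet? tokens p).getD 0 := by
  rw [PySem.List.pyGet?_eq_some_getElem tokens h0 hl]
  unfold pvSum
  have h1 : (p + 1).toNat = p.toNat + 1 := by omega
  rw [h1, List.sum_take_succ tokens p.toNat (by omega)]
  simp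

lemma pvOverlapStart_bounds (pre : List Int) (ov s p : Int) :
    ∀ (fuel : Nat) (m : Int), fuel = (m - s).toNat → s ≤ m →
    s ≤ pvOverlapStart pre ov s p fuel m ∧ pvOverlapStart pre ov s p fuel m ≤ m := by
  intro fuel
  induction fuel with
  | zero => intro m _ hm; simp only [pvOverlapStart]; omega
  | succ f ihf =>
    intro m hf hm
    simp only [pvOverlapStart]
    split
    · omega
    · have := ihf (m - 1) (by omega) (by omega)
      omega

-- A's overlap backtracking loop computes exactly B's overlap_start, in prefix-sum terms
lemma pvAOverlap_eq (tokens : List Int) (ov s p : Int) (hs : 0 ≤ s)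
    (hpn : p ≤ (tokens.length : Int)) :
    ∀ (k fuelA : Nat) (m : Int), (m - s).toNat ≤ k → (m - s).toNat ≤ fuelA → s ≤ m → m ≤ p →
    pvAOverlap tokens s ov fuelA (m - 1) (pvSum tokens p - pvSum tokens m)
      = (pvOverlapStart (pvBuildPrefix tokens 0) ov s p ((m - s).toNat) m - 1,
         pvSum tokens p - pvSum tokens
           (pvOverlapStart (pvBuildPrefix tokens 0) ov s p ((m - s).toNat) m)) := by
  intro k
  induction k with
  | zero =>
    intro fuelA m hk hfA hsm hmp
    have hms : m = s := by omega
    subst hms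
    rw [show (m - m).toNat = 0 from by omega]
    simp only [pvOverlapStart]
    cases fuelA with
    | zero => rfl
    | succ f =>
      simp only [pvAOverlap]
      rw [if_neg (by omega : ¬ (m ≤ m - 1 ∧ pvSum tokens p - pvSum tokens m < ov))]
  | succ k ih =>
    intro fuelA m hk hfA hsm hmp
    by_cases hsltm : s < m
    · have hpp := pvPref_eq tokens p (by omega) hpn
      have hpm := pvPref_eq tokens m (by omega) (by omega)
      obtain ⟨g, hg⟩ : ∃ g, fuelA = g + 1 := ⟨fuelA - 1, by omega⟩
      subst hg
      rw [show (m - s).toNat = (m - 1 - s).toNat + 1 from by omega]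
      simp only [pvAOverlap, pvOverlapStart]
      by_cases hcond : pvSum tokens p - pvSum tokens m < ov
      · have hnotge : ¬ (pvPref (pvBuildPrefix tokens 0) p - pvPref (pvBuildPrefix tokens 0) m ≥ ov) := by
          rw [hpp, hpm]; omega
        rw [if_pos ⟨by omega, hcond⟩, if_neg hnotge]
        have hsucc := pvSum_succ tokens (m - 1) (by omega) (by omega)
        rw [show m - 1 + 1 = m from by omega] at hsucc
        rw [show pvSum tokens p - pvSum tokens m + (PySem.List.pyGet? tokens (m - 1)).getD 0
            = pvSum tokens p - pvSum tokens (m - 1) from by omega]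
        exact ih g (m - 1) (by omega) (by omega) (by omega) (by omega)
      · have hge : pvPref (pvBuildPrefix tokens 0) p - pvPref (pvBuildPrefix tokens 0) m ≥ ov := by
          rw [hpp, hpm]; omega
        rw [if_neg (by omega : ¬ (s ≤ m - 1 ∧ pvSum tokens p - pvSum tokens m < ov)), if_pos hge]
    · have hms : m = s := by omega
      subst hms
      rw [show (m - m).toNat = 0 from by omega]
      simp only [pvOverlapStart]
      cases fuelA with
      | zero => rfl
      | succ f =>
        simp only [pvAOverlap]
        rw [if_neg (by omega : ¬ (m ≤ m - 1 ∧ pvSum tokens p - pvSum tokens m < ov))]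

lemma pvNextBreak_eq_n (pre : List Int) (mx n s p : Int) (h : ¬ p < n) :
    pvNextBreak pre mx n s ((n - p).toNat) p = n := by
  rw [show (n - p).toNat = 0 from by omega]
  rfl

lemma pvNextBreak_self (pre : List Int) (mx n s p : Int) (h : p < n)
    (hc : pvPref pre (p + 1) - pvPref pre s > mx ∧ pvPref pre p - pvPref pre s > 0) :
    pvNextBreak pre mx n s ((n - p).toNat) p = p := by
  rw [show (n - p).toNat = (n - (p + 1)).toNat + 1 from by omega]
  simp only [pvNextBreak]
  rw [if_pos hc]

lemma pvNextBreak_step (pre : List Int) (mx n s p : Int) (h : p < n)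
    (hc : ¬ (pvPref pre (p + 1) - pvPref pre s > mx ∧ pvPref pre p - pvPref pre s > 0)) :
    pvNextBreak pre mx n s ((n - p).toNat) p = pvNextBreak pre mx n s ((n - (p + 1)).toNat) (p + 1) := by
  rw [show (n - p).toNat = (n - (p + 1)).toNat + 1 from by omega]
  simp only [pvNextBreak]
  rw [if_neg hc]

-- A's final "Add final chunk" step applied to the loop's final state
def pvFinish (tokens : List Int) (st : List (List (String × Int)) × Int × Int × Int) :
    List (List (String × Int)) :=
  match st with
  | (chunks, s, cur, idx) =>
    if cur > 0 then
      chunks ++ [pvMkChunk idx s ((tokens.length : Int) - 1) ((tokens.length : Int) - s) cur]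
    else chunks

lemma pv_main (tokens : List Int) (mx ov : Int) :
    ∀ (k fuel : Nat) (p s : Int) (chunks : List (List (String × Int))),
    ((tokens.length : Int) - p).toNat ≤ k → ((tokens.length : Int) + 1 - p).toNat ≤ fuel →
    0 ≤ s → s ≤ p → p ≤ (tokens.length : Int) →
    pvFinish tokens (pvALoop tokens mx ov (tokens.drop p.toNat) p chunks s
        (pvSum tokens p - pvSum tokens s) (chunks.length : Int))
      = pvBLoop (pvBuildPrefix tokens 0) mx ov (tokens.length : Int) fuel chunks s p := by
  intro k
  induction k with
  | zero =>
    intro fuel p s chunks hk hfuel hs hsp hpn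
    have hpe : p = (tokens.length : Int) := by omega
    subst hpe
    have hdrop : tokens.drop ((tokens.length : Int)).toNat = [] := by simp
    rw [hdrop]
    simp only [pvALoop, pvFinish]
    obtain ⟨f, hf⟩ : ∃ f, fuel = f + 1 := ⟨fuel - 1, by omega⟩
    subst hf
    simp only [pvBLoop]
    rw [if_pos (pvNextBreak_eq_n _ mx _ s _ (by omega))]
    simp only [pvBMake, pvMkChunk]
    rw [pvPref_eq tokens _ (by omega) (by omega), pvPref_eq tokens s hs (by omega)]
  | succ k ih =>
    intro fuel p s chunks hk hfuel hs hsp hpn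
    by_cases hpltn : p < (tokens.length : Int)
    · cases hD : tokens.drop p.toNat with
      | nil =>
        exfalso
        have := congrArg List.length hD
        simp at this
        omega
      | cons t rest =>
        have hget? : tokens[p.toNat]? = some t := by
          rw [← List.head?_drop, hD, List.head?_cons]
        have hpy : PySem.List.pyGet? tokens p = some t := by
          rw [PySem.List.pyGet?_of_nonneg tokens (by omega), hget?]
        have hstep : pvSum tokens (p + 1) = pvSum tokens p + t := by
          have h1 := pvSum_succ tokens p (by omega) (by omega)
          rw [hpy] at h1
          simpa using h1
        have hrest : rest = tokens.drop ((p + 1).toNat) := by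
          rw [show (p + 1).toNat = p.toNat + 1 from by omega, ← List.tail_drop, hD, List.tail_cons]
        have hpp := pvPref_eq tokens p (by omega) (by omega)
        have hpp1 := pvPref_eq tokens (p + 1) (by omega) (by omega)
        have hps := pvPref_eq tokens s hs (by omega)
        simp only [pvALoop]
        by_cases hc : pvSum tokens p - pvSum tokens s + t > mx ∧ pvSum tokens p - pvSum tokens s > 0
        · -- split at page p: both emit a chunk and restart at the overlap start
          have hnb : pvNextBreak (pvBuildPrefix tokens 0) mx (tokens.length : Int) s
              (((tokens.length : Int) - p).toNat) p = p := by
            apply pvNextBreak_self _ _ _ _ _ hpltn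
            rw [hpp, hpp1, hps, hstep]
            omega
          have hov : pvAOverlap tokens s ov tokens.length (p - 1) 0
              = (pvOverlapStart (pvBuildPrefix tokens 0) ov s p ((p - s).toNat) p - 1,
                 pvSum tokens p - pvSum tokens
                   (pvOverlapStart (pvBuildPrefix tokens 0) ov s p ((p - s).toNat) p)) := by
            have hov0 := pvAOverlap_eq tokens ov s p hs (by omega) (p - s).toNat tokens.length p
              (by omega) (by omega) hsp le_rfl
            rw [show pvSum tokens p - pvSum tokens p = 0 from by ring] at hov0
            exact hov0
          have hob := pvOverlapStart_bounds (pvBuildPrefix tokens 0) ov s p (p - s).toNat p rfl hsp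
          rw [if_pos hc]
          simp only [hov]
          rw [show max 0 (pvOverlapStart (pvBuildPrefix tokens 0) ov s p ((p - s).toNat) p - 1 + 1)
              = pvOverlapStart (pvBuildPrefix tokens 0) ov s p ((p - s).toNat) p from by omega]
          rw [show pvSum tokens p
                - pvSum tokens (pvOverlapStart (pvBuildPrefix tokens 0) ov s p ((p - s).toNat) p) + t
              = pvSum tokens (p + 1)
                - pvSum tokens (pvOverlapStart (pvBuildPrefix tokens 0) ov s p ((p - s).toNat) p)
              from by omega]
          rw [show ((chunks.length : Int) + 1)
              = (((chunks ++ [pvMkChunk (chunks.length : Int) s (p - 1) (p - s)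
                  (pvSum tokens p - pvSum tokens s)]).length : Int)) from by simp]
          rw [hrest]
          obtain ⟨f, hf⟩ : ∃ f, fuel = f + 1 := ⟨fuel - 1, by omega⟩
          subst hf
          rw [ih f (p + 1) (pvOverlapStart (pvBuildPrefix tokens 0) ov s p ((p - s).toNat) p)
              (chunks ++ [pvMkChunk (chunks.length : Int) s (p - 1) (p - s)
                (pvSum tokens p - pvSum tokens s)])
              (by omega) (by omega) (by omega) (by omega) (by omega)]
          conv_rhs => rw [pvBLoop]
          rw [if_neg (by rw [hnb]; omega)]
          rw [hnb]
          simp only [pvBMake, pvMkChunk, hpp, hps]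
        · -- no split at page p: A accumulates, B's next_break skips page p
          have hnb : pvNextBreak (pvBuildPrefix tokens 0) mx (tokens.length : Int) s
                (((tokens.length : Int) - p).toNat) p
              = pvNextBreak (pvBuildPrefix tokens 0) mx (tokens.length : Int) s
                (((tokens.length : Int) - (p + 1)).toNat) (p + 1) := by
            apply pvNextBreak_step _ _ _ _ _ hpltn
            rw [hpp, hpp1, hps, hstep]
            omega
          rw [if_neg hc]
          rw [show pvSum tokens p - pvSum tokens s + t = pvSum tokens (p + 1) - pvSum tokens s
              from by omega]
          rw [hrest]
          rw [ih fuel (p + 1) s chunks (by omega) (by omega) hs (by omega) (by omega)]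
          obtain ⟨f, hf⟩ : ∃ f, fuel = f + 1 := ⟨fuel - 1, by omega⟩
          subst hf
          simp only [pvBLoop]
          rw [← hnb]
    · exact ih fuel p s chunks (by omega) hfuel hs hsp hpn

-- ===== VERDICT (by name: the statement is the Claim_ definition above) =====
theorem calculate_chunks_token_based_spec : Claim_equal_calculate_chunks_token_based := by
  intro tokens mx ov _dom
  unfold Spec_calculate_chunks_token_based calculate_chunks_token_based calculate_chunks_token_based_alt
  have h := pv_main tokens mx ov tokens.length (tokens.length + 1) 0 0 [] (by omega) (by omega)
    le_rfl le_rfl (by omega)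
  simp only [pvSum, Int.toNat_zero, List.take_zero, List.sum_nil, sub_self, List.drop_zero,
    List.length_nil, Nat.cast_zero] at h
  rw [← h]
  rfl
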